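-- pv_equiv track=rewrite | github.com/zhangyingjie7/GrainV1 | main.py | genTerms_Tz_Tb
-- ===== SOURCE A (Python) =====
-- A = [1,2,4,10,31,43,56]
--
-- def genTerms_Tz_Tb(Tz,Tb):
--
--     Terms = []
--
--     # g'(b^(t+j))
--     for j in A:
--         for i in Tz:
--             Term = [['b_' + str(j + i)]]
--             Terms = Terms + Term
--
--     # b_{t+128+j}, g(b^(t+j))
--     for j in Tb:
--         Term = [['b_' + str(j + 80)], \
--           ['b_' + str(j + 62)], ['b_' + str(j + 60)], ['b_' + str(j + 52)], ['b_' + str(j + 45)], ['b_' + str(j + 37)], \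
--           ['b_' + str(j + 33)],['b_' + str(j + 28)],['b_' + str(j + 21)],['b_' + str(j + 14)],['b_' + str(j + 9)],\
--           ['b_' + str(j + 0)],['b_' + str(j + 63), 'b_' + str(j + 60)], ['b_' + str(j + 37), 'b_' + str(j + 33)],\
--           ['b_' + str(j + 15), 'b_' + str(j + 9)],['b_' + str(j + 60), 'b_' + str(j + 52),'b_' + str(j + 45)],\
--           ['b_' + str(j + 33),'b_' + str(j + 28),'b_' + str(j + 21)],\
--           ['b_' + str(j + 63),'b_' + str(j + 45),'b_' + str(j +28),'b_' + str(j + 9)],\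
--           ['b_' + str(j + 60),'b_' + str(j + 52),'b_' + str(j + 37),'b_' + str(j + 33)],\
--           ['b_' + str(j + 63),'b_' + str(j + 60),'b_' + str(j + 21),'b_' + str(j + 15)],\
--           ['b_' + str(j + 63),'b_' + str(j + 60),'b_' + str(j + 52),'b_' + str(j + 45),'b_' + str(j + 37)],\
--           ['b_' + str(j + 33),'b_' + str(j + 28),'b_' + str(j + 21),'b_' + str(j + 15),'b_' + str(j + 9)],\
--           ['b_' + str(j + 52),'b_' + str(j + 45),'b_' + str(j + 37),'b_' + str(j + 33),'b_' + str(j + 28),'b_' + str(j + 21)]]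
--         Terms = Terms + Term
--     return Terms
-- ===== SOURCE B (Python) =====
-- A = [1, 2, 4, 10, 31, 43, 56]
--
-- OFFSETS = [[80], [62], [60], [52], [45], [37], [33], [28], [21], [14], [9],
--            [0], [63, 60], [37, 33], [15, 9], [60, 52, 45], [33, 28, 21],
--            [63, 45, 28, 9], [60, 52, 37, 33], [63, 60, 21, 15],
--            [63, 60, 52, 45, 37], [33, 28, 21, 15, 9],
--            [52, 45, 37, 33, 28, 21]]
--
--
-- def genTerms_Tz_Tb(Tz, Tb):
--     # Single indexed pass: the k-th output term is computed directly from k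
--     # by div/mod arithmetic instead of nested accumulation loops.
--     n = len(Tz)
--
--     def term(k):
--         if k < 7 * n:
--             j = A[k // n] + Tz[k % n]
--             return ['b_' + str(j)]
--         r = k - 7 * n
--         j = Tb[r // 23]
--         return ['b_' + str(j + o) for o in OFFSETS[r % 23]]
--
--     return [term(k) for k in range(7 * n + 23 * len(Tb))]
-- ===== Notes on version B (the rewrite author's own statement) =====
-- stated objective: alternative
-- what changed: B computes the k-th output term directly from the flat index k by div/mod arithmetic (one indexed pass over range(7*len(Tz)+23*len(Tb)) with an offset table), replacing A's nested loops that repeatedly rebuild the accumulator with 'Terms = Terms + Term'.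
import Mathlib
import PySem

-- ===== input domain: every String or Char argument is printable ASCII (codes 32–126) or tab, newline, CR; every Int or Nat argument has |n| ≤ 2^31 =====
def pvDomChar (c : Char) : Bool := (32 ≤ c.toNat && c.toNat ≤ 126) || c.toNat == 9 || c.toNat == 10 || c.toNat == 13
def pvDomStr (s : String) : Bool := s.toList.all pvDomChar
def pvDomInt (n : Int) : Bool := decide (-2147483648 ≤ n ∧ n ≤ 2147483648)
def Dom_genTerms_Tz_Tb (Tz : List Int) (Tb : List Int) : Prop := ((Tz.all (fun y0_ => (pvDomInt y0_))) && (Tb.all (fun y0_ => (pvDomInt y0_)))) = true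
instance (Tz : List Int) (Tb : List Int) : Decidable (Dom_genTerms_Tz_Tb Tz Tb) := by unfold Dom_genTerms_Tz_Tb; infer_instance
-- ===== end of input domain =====

-- B computes the k-th term directly from its index k by div/mod arithmetic in one
-- indexed pass, instead of A's nested loops that repeatedly rebuild the accumulator.

-- ===== PORT A =====
-- module constant A
def pvA_const : List Int := [1, 2, 4, 10, 31, 43, 56]

def genTerms_Tz_Tb (Tz : List Int) (Tb : List Int) : List (List String) :=
  -- Terms = []; first double loop: Terms = Terms + [['b_'+str(j+i)]]
  let Terms : List (List String) :=
    pvA_const.foldl (fun Terms j =>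
      Tz.foldl (fun Terms i => Terms ++ [["b_" ++ PySem.Int.toStr (j + i)]]) Terms) []
  -- second loop: Terms = Terms + Term with the literal 23-element Term
  Tb.foldl (fun Terms j =>
    Terms ++ [["b_" ++ PySem.Int.toStr (j + 80)],
      ["b_" ++ PySem.Int.toStr (j + 62)], ["b_" ++ PySem.Int.toStr (j + 60)],
      ["b_" ++ PySem.Int.toStr (j + 52)], ["b_" ++ PySem.Int.toStr (j + 45)],
      ["b_" ++ PySem.Int.toStr (j + 37)], ["b_" ++ PySem.Int.toStr (j + 33)],
      ["b_" ++ PySem.Int.toStr (j + 28)], ["b_" ++ PySem.Int.toStr (j + 21)],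
      ["b_" ++ PySem.Int.toStr (j + 14)], ["b_" ++ PySem.Int.toStr (j + 9)],
      ["b_" ++ PySem.Int.toStr (j + 0)],
      ["b_" ++ PySem.Int.toStr (j + 63), "b_" ++ PySem.Int.toStr (j + 60)],
      ["b_" ++ PySem.Int.toStr (j + 37), "b_" ++ PySem.Int.toStr (j + 33)],
      ["b_" ++ PySem.Int.toStr (j + 15), "b_" ++ PySem.Int.toStr (j + 9)],
      ["b_" ++ PySem.Int.toStr (j + 60), "b_" ++ PySem.Int.toStr (j + 52), "b_" ++ PySem.Int.toStr (j + 45)],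
      ["b_" ++ PySem.Int.toStr (j + 33), "b_" ++ PySem.Int.toStr (j + 28), "b_" ++ PySem.Int.toStr (j + 21)],
      ["b_" ++ PySem.Int.toStr (j + 63), "b_" ++ PySem.Int.toStr (j + 45), "b_" ++ PySem.Int.toStr (j + 28), "b_" ++ PySem.Int.toStr (j + 9)],
      ["b_" ++ PySem.Int.toStr (j + 60), "b_" ++ PySem.Int.toStr (j + 52), "b_" ++ PySem.Int.toStr (j + 37), "b_" ++ PySem.Int.toStr (j + 33)],
      ["b_" ++ PySem.Int.toStr (j + 63), "b_" ++ PySem.Int.toStr (j + 60), "b_" ++ PySem.Int.toStr (j + 21), "b_" ++ PySem.Int.toStr (j + 15)],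
      ["b_" ++ PySem.Int.toStr (j + 63), "b_" ++ PySem.Int.toStr (j + 60), "b_" ++ PySem.Int.toStr (j + 52), "b_" ++ PySem.Int.toStr (j + 45), "b_" ++ PySem.Int.toStr (j + 37)],
      ["b_" ++ PySem.Int.toStr (j + 33), "b_" ++ PySem.Int.toStr (j + 28), "b_" ++ PySem.Int.toStr (j + 21), "b_" ++ PySem.Int.toStr (j + 15), "b_" ++ PySem.Int.toStr (j + 9)],
      ["b_" ++ PySem.Int.toStr (j + 52), "b_" ++ PySem.Int.toStr (j + 45), "b_" ++ PySem.Int.toStr (j + 37), "b_" ++ PySem.Int.toStr (j + 33), "b_" ++ PySem.Int.toStr (j + 28), "b_" ++ PySem.Int.toStr (j + 21)]]) Terms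

-- ===== PORT B =====
def pvA_alt : List Int := [1, 2, 4, 10, 31, 43, 56]

def pvOffsets : List (List Int) :=
  [[80], [62], [60], [52], [45], [37], [33], [28], [21], [14], [9], [0],
   [63, 60], [37, 33], [15, 9], [60, 52, 45], [33, 28, 21], [63, 45, 28, 9],
   [60, 52, 37, 33], [63, 60, 21, 15], [63, 60, 52, 45, 37], [33, 28, 21, 15, 9],
   [52, 45, 37, 33, 28, 21]]

-- term(k) of Source B; Python's in-range list indexing A[...] is ported as getD
-- (every index taken is in range, so this is exact)
def pvTerm (Tz : List Int) (Tb : List Int) (k : Nat) : List String :=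
  let n := Tz.length
  if k < 7 * n then
    let j := pvA_alt.getD (k / n) 0 + Tz.getD (k % n) 0
    ["b_" ++ PySem.Int.toStr j]
  else
    let r := k - 7 * n
    let j := Tb.getD (r / 23) 0
    (pvOffsets.getD (r % 23) []).map (fun o => "b_" ++ PySem.Int.toStr (j + o))

def genTerms_Tz_Tb_alt (Tz : List Int) (Tb : List Int) : List (List String) :=
  (List.range (7 * Tz.length + 23 * Tb.length)).map (pvTerm Tz Tb)

-- ===== PRECONDITION & SPEC =====
def Spec_genTerms_Tz_Tb (Tz : List Int) (Tb : List Int) (out : List (List String)) : Prop := out = genTerms_Tz_Tb_alt Tz Tb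
instance (Tz : List Int) (Tb : List Int) (out : List (List String)) : Decidable (Spec_genTerms_Tz_Tb Tz Tb out) := by unfold Spec_genTerms_Tz_Tb; infer_instance

-- ===== CLAIM (what is proved, stated in full; the proofs are below) =====
def Claim_equal_genTerms_Tz_Tb : Prop := ∀ (Tz : List Int) (Tb : List Int), Dom_genTerms_Tz_Tb Tz Tb → Spec_genTerms_Tz_Tb Tz Tb (genTerms_Tz_Tb Tz Tb)

-- ===== LEMMAS AND PROOFS =====

lemma map_range_getD {α β : Type} (l : List α) (d : α) (f : α → β) :
    (List.range l.length).map (fun i => f (l.getD i d)) = l.map f := by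
  induction l with
  | nil => simp
  | cons a l ih =>
    simp only [List.length_cons, List.range_succ_eq_map, List.map_cons, List.map_map]
    simpa using congrArg (List.cons (f a)) ih

lemma flatMap_range_getD {α β : Type} (l : List α) (d : α) (f : α → List β) :
    (List.range l.length).flatMap (fun i => f (l.getD i d)) = l.flatMap f := by
  induction l with
  | nil => simp
  | cons a l ih =>
    simp only [List.length_cons, List.range_succ_eq_map, List.flatMap_cons, List.flatMap_map]
    simpa using congrArg (fun t => f a ++ t) ih

lemma map_range_grid {α : Type} (f : Nat → Nat → α) (c n : Nat) :
    (List.range (c * n)).map (fun k => f (k / n) (k % n))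
      = (List.range c).flatMap (fun q => (List.range n).map (fun r => f q r)) := by
  induction c with
  | zero => simp
  | succ c ih =>
    rcases Nat.eq_zero_or_pos n with h | h
    · simp [h]
    · have hcn : (c + 1) * n = c * n + n := by ring
      rw [hcn, List.range_add, List.map_append, ih, List.range_succ, List.flatMap_append]
      simp only [List.flatMap_cons, List.flatMap_nil, List.append_nil, List.map_map]
      congr 1
      apply List.map_congr_left
      intro r hr
      have hrn : r < n := List.mem_range.mp hr
      have hdiv : (c * n + r) / n = c := by
        rw [Nat.add_comm, Nat.add_mul_div_right _ _ h, Nat.div_eq_of_lt hrn]; omega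
      have hmod : (c * n + r) % n = r := by
        rw [Nat.add_comm, Nat.add_mul_mod_self_right, Nat.mod_eq_of_lt hrn]
      simp [Function.comp, hdiv, hmod]

lemma alt_eq (Tz Tb : List Int) :
    genTerms_Tz_Tb_alt Tz Tb
      = pvA_alt.flatMap (fun j => Tz.map (fun i => ["b_" ++ PySem.Int.toStr (j + i)]))
        ++ Tb.flatMap (fun j => pvOffsets.map (fun g => g.map (fun o => "b_" ++ PySem.Int.toStr (j + o)))) := by
  unfold genTerms_Tz_Tb_alt
  rw [List.range_add, List.map_append]
  congr 1
  · -- first segment: indices k < 7·|Tz|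
    have h1 : (List.range (7 * Tz.length)).map (pvTerm Tz Tb)
        = (List.range (7 * Tz.length)).map (fun k =>
            ["b_" ++ PySem.Int.toStr (pvA_alt.getD (k / Tz.length) 0 + Tz.getD (k % Tz.length) 0)]) := by
      apply List.map_congr_left
      intro k hk
      have : k < 7 * Tz.length := List.mem_range.mp hk
      simp [pvTerm, this]
    rw [h1, map_range_grid (fun q r => ["b_" ++ PySem.Int.toStr (pvA_alt.getD q 0 + Tz.getD r 0)]) 7 Tz.length]
    have h7 : (7 : Nat) = pvA_alt.length := rfl
    rw [h7, flatMap_range_getD pvA_alt 0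
      (fun j => (List.range Tz.length).map (fun r => ["b_" ++ PySem.Int.toStr (j + Tz.getD r 0)]))]
    apply List.flatMap_congr  -- congruence over the outer list
    intro j _
    exact map_range_getD Tz 0 (fun i => ["b_" ++ PySem.Int.toStr (j + i)])
  · -- second segment: indices 7·|Tz| + r with r < 23·|Tb|
    rw [List.map_map]
    have h2 : (List.range (23 * Tb.length)).map ((pvTerm Tz Tb) ∘ (fun r => 7 * Tz.length + r))
        = (List.range (23 * Tb.length)).map (fun r =>
            (pvOffsets.getD (r % 23) []).map
              (fun o => "b_" ++ PySem.Int.toStr (Tb.getD (r / 23) 0 + o))) := by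
      apply List.map_congr_left
      intro r _
      have hnot : ¬ (7 * Tz.length + r < 7 * Tz.length) := by omega
      simp [Function.comp, pvTerm, hnot]
    rw [h2, Nat.mul_comm 23 Tb.length,
      map_range_grid (fun q s => (pvOffsets.getD s []).map
        (fun o => "b_" ++ PySem.Int.toStr (Tb.getD q 0 + o))) Tb.length 23]
    rw [flatMap_range_getD Tb 0
      (fun j => (List.range 23).map (fun s => (pvOffsets.getD s []).map
        (fun o => "b_" ++ PySem.Int.toStr (j + o))))]
    apply List.flatMap_congr
    intro j _
    have h23 : (23 : Nat) = pvOffsets.length := rfl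
    rw [h23]
    exact map_range_getD pvOffsets []
      (fun g => g.map (fun o => "b_" ++ PySem.Int.toStr (j + o)))

lemma inner_loop_eq (Tz : List Int) (j : Int) (acc : List (List String)) :
    Tz.foldl (fun Terms i => Terms ++ [["b_" ++ PySem.Int.toStr (j + i)]]) acc
      = acc ++ Tz.map (fun i => ["b_" ++ PySem.Int.toStr (j + i)]) :=
  PySem.List.foldl_append_singleton_eq_map ..

lemma first_loop_eq (Tz : List Int) :
    pvA_const.foldl (fun Terms j =>
        Tz.foldl (fun Terms i => Terms ++ [["b_" ++ PySem.Int.toStr (j + i)]]) Terms) []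
      = pvA_alt.flatMap (fun j => Tz.map (fun i => ["b_" ++ PySem.Int.toStr (j + i)])) := by
  simp only [pvA_const, pvA_alt, List.foldl_cons, List.foldl_nil, inner_loop_eq,
    List.flatMap_cons, List.flatMap_nil, List.nil_append, List.append_assoc, List.append_nil]

-- ===== VERDICT (by name: the statement is the Claim_ definition above) =====
theorem genTerms_Tz_Tb_spec : Claim_equal_genTerms_Tz_Tb := by
  intro Tz Tb _
  unfold Spec_genTerms_Tz_Tb genTerms_Tz_Tb
  rw [alt_eq, first_loop_eq, PySem.List.foldl_append_eq_flatMap]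
  congr 1
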